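-- pv_equiv track=rewrite | github.com/Tomasz-Kluczkowski/Education | THINK LIKE A COMPUTER SCIENTIST FOR PYTHON 3/CHAPTER 14 LIST ALGORITHMS - TEST DRIVEN DEV/lotto draws.py | prime_misses
-- ===== SOURCE A (Python) =====
-- def primes_in(ticket):
--     """ Returns how many numers are prime in the ticket """
--     number_of_primes = 0
--
--     for item in ticket:
--         divides_no_remainder = 0
--         for i in range(1, item+1):
--             if item % i == 0:
--                 divides_no_remainder += 1
--         if divides_no_remainder == 2:
--             number_of_primes += 1
--
--     return number_of_primes
--
-- def prime_misses(ticket):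
--     """ Returns a list of unused primes in the list of tickets """
--     list_of_primes = []
--     for i in range(1,50):
--         if primes_in([i]) == 1:
--             list_of_primes.append(i)
--
--     for sub_item in ticket:
--         for elem in sub_item:
--             if elem in list_of_primes:
--                 list_of_primes.remove(elem)
--
--     return list_of_primes
-- ===== SOURCE B (Python) =====
-- def prime_misses(ticket):
--     """ Returns a list of unused primes in the list of tickets """
--     primes = [p for p in range(2, 50) if all(p % d != 0 for d in range(2, p))]
--     seen = {elem for sub_item in ticket for elem in sub_item}
--     return [p for p in primes if p not in seen]
-- ===== Notes on version B (the rewrite author's own statement) =====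
-- stated objective: simpler
-- what changed: Primes 2-49 come from direct trial division instead of the divisor-counting helper, and the scan-and-mutate nested removal loop is replaced by flattening the ticket into a set once and filtering the prime list in a single non-mutating pass.
import Mathlib
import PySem

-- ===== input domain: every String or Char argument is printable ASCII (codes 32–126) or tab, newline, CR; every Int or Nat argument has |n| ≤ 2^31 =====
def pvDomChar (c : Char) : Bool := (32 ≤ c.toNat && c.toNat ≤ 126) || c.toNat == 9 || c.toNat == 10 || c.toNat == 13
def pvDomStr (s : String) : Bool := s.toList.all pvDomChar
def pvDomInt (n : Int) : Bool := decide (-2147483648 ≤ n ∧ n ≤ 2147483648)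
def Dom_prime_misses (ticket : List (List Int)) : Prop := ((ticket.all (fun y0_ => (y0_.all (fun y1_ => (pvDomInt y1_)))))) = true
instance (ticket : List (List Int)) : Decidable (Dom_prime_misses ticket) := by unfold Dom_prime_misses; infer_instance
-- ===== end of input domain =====

-- B replaces A's scan-and-mutate removal loop by flattening the ticket into a set once
-- and filtering the prime list in a single non-mutating pass (objective: simpler).

-- ===== PORT A =====
def primes_in (ticket : List Int) : Int :=
  ticket.foldl (fun number_of_primes item =>
    let divides_no_remainder : Int :=
      (PySem.List.pyRange 1 (item + 1) 1).foldl
        (fun c i => if PySem.Int.mod item i = 0 then c + 1 else c) 0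
    if divides_no_remainder = 2 then number_of_primes + 1 else number_of_primes) 0

def prime_misses (ticket : List (List Int)) : List Int :=
  let list_of_primes : List Int :=
    (PySem.List.pyRange 1 50 1).foldl
      (fun acc i => if primes_in [i] = 1 then acc ++ [i] else acc) []
  ticket.foldl (fun lp sub_item =>
    sub_item.foldl (fun lp elem =>
      if elem ∈ lp then (PySem.List.remove? lp elem).getD lp else lp) lp) list_of_primes

-- ===== PORT B =====
def prime_misses_alt (ticket : List (List Int)) : List Int :=
  let primes : List Int :=
    (PySem.List.pyRange 2 50 1).filter
      (fun p => (PySem.List.pyRange 2 p 1).all (fun d => PySem.Int.mod p d != 0))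
  let seen : PySem.Set Int := PySem.Set.ofList ticket.flatten
  primes.filter (fun p => !(PySem.Set.contains seen p))

-- ===== PRECONDITION & SPEC =====
def Spec_prime_misses (ticket : List (List Int)) (out : List Int) : Prop := out = prime_misses_alt ticket
instance (ticket : List (List Int)) (out : List Int) : Decidable (Spec_prime_misses ticket out) := by unfold Spec_prime_misses; infer_instance

-- ===== CLAIM (what is proved, stated in full; the proofs are below) =====
def Claim_equal_prime_misses : Prop := ∀ (ticket : List (List Int)), Dom_prime_misses ticket → Spec_prime_misses ticket (prime_misses ticket)

-- ===== LEMMAS AND PROOFS =====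

-- A's generated prime list equals B's generated prime list (both closed terms).
theorem primesA_eq_primesB :
    (PySem.List.pyRange 1 50 1).foldl
      (fun acc i => if primes_in [i] = 1 then acc ++ [i] else acc) []
    = (PySem.List.pyRange 2 50 1).filter
      (fun p => (PySem.List.pyRange 2 p 1).all (fun d => PySem.Int.mod p d != 0)) := by
  decide

theorem primesA_nodup :
    ((PySem.List.pyRange 1 50 1).foldl
      (fun acc i => if primes_in [i] = 1 then acc ++ [i] else acc) ([] : List Int)).Nodup := by
  decide

-- one removal step on a duplicate-free list is a filter
theorem step_eq_filter (L : List Int) (hL : L.Nodup) (e : Int) :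
    (if e ∈ L then (PySem.List.remove? L e).getD L else L)
      = L.filter (fun p => p != e) := by
  by_cases h : e ∈ L
  · rw [if_pos h, PySem.List.remove?_eq_some_erase L e h, Option.getD_some, hL.erase_eq_filter]
  · rw [if_neg h]
    refine (List.filter_eq_self.mpr ?_).symm
    intro a ha
    simp only [bne_iff_ne, ne_eq]
    rintro rfl; exact h ha

-- folding the removal step over a list of seen elements filters them all out
theorem foldl_remove_eq_filter (xs : List Int) :
    ∀ (L : List Int), L.Nodup →
    xs.foldl (fun lp elem => if elem ∈ lp then (PySem.List.remove? lp elem).getD lp else lp) L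
      = L.filter (fun p => !(decide (p ∈ xs))) := by
  induction xs with
  | nil => intro L _; simp
  | cons e xs ih =>
    intro L hL
    have hstep := step_eq_filter L hL e
    simp only [List.foldl_cons, hstep, ih _ (hL.filter _), List.filter_filter]
    refine List.filter_congr ?_
    intro a _
    by_cases hae : a = e <;> simp [hae]

-- ===== VERDICT (by name: the statement is the Claim_ definition above) =====
theorem prime_misses_spec : Claim_equal_prime_misses := by
  intro ticket _
  unfold Spec_prime_misses prime_misses prime_misses_alt
  rw [← List.foldl_flatten, foldl_remove_eq_filter _ _ primesA_nodup, primesA_eq_primesB]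
  refine List.filter_congr ?_
  intro p _
  simp [PySem.Set.contains_eq_listContains, PySem.Set.mem_ofList]
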